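-- pv_equiv track=rewrite | github.com/aai-institute/Startup-Risk-Classifier-EU-AI-Act | re_functions/use_case_extractor.py | generate_tag_variants
-- ===== SOURCE A (Python) =====
-- import itertools
--
-- def generate_tag_variants(tag):
--         """Generate all variants by replacing spaces with '', '-' or keeping space."""
--         parts = tag.split(" ")
--         combinations = list(itertools.product(["", "-", " "], repeat=len(parts)-1))
--         variants = set()
--
--         for combo in combinations:
--             variant = parts[0]
--             for sep, part in zip(combo, parts[1:]):
--                 variant += sep + part
--             variants.add(variant)
--         return variants
-- ===== SOURCE B (Python) =====
-- def generate_tag_variants(tag):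
--     """Generate all variants by replacing spaces with '', '-' or keeping space."""
--     parts = tag.split(" ")
--     current = [parts[0]]
--     for part in parts[1:]:
--         current = list(dict.fromkeys(v + sep + part
--                                      for v in current for sep in ("", "-", " ")))
--     return set(current)
-- ===== Notes on version B (the rewrite author's own statement) =====
-- stated objective: alternative
-- what changed: Replaces the itertools.product enumeration of all 3^(n-1) separator tuples (each variant rebuilt from scratch by a zip loop) with a single incremental fold over the words that extends a deduplicated prefix list one word at a time, so shared prefixes are built once and duplicates are pruned at every step.
import Mathlib
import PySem

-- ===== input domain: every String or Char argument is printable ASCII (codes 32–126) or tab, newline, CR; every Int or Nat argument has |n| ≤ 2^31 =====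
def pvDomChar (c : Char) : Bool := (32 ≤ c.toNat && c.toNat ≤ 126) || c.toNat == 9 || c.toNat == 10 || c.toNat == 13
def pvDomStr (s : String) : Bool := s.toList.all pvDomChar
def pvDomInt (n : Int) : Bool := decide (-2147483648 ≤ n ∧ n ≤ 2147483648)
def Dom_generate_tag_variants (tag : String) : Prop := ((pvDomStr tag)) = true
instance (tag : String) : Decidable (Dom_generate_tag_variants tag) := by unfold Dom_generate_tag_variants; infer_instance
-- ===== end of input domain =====

-- B replaces the itertools.product enumeration of separator tuples with an incremental
-- fold over the words that extends a deduplicated prefix list one word at a time (objective: alternative).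


-- ===== PORT A =====
-- itertools.product(["", "-", " "], repeat=n), in product order (rightmost varies fastest)
def pyProdSeps : Nat → List (List String)
  | 0 => [[]]
  | n + 1 => (pyProdSeps n).flatMap (fun c => ["", "-", " "].map (fun s => c ++ [s]))

def generate_tag_variants (tag : String) : List String :=
  match PySem.Str.split? tag " " with
  | none => []      -- unreachable: the separator " " is not empty
  | some [] => []   -- unreachable: str.split(" ") never returns an empty list
  | some (p0 :: rest) =>
      (pyProdSeps ((p0 :: rest).length - 1)).foldl
        (fun vs c =>
          PySem.Set.add vs
            ((c.zip (PySem.List.slice (p0 :: rest) (some 1) none)).foldl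
              (fun v sp => v ++ sp.1 ++ sp.2) p0))
        PySem.Set.empty

-- ===== PORT B =====
def generate_tag_variants_alt (tag : String) : List String :=
  match PySem.Str.split? tag " " with
  | none => []      -- unreachable: the separator " " is not empty
  | some [] => []   -- unreachable: str.split(" ") never returns an empty list
  | some (p0 :: rest) =>
      rest.foldl
        (fun cur part =>
          PySem.Set.ofList (cur.flatMap (fun v => ["", "-", " "].map (fun sep => v ++ sep ++ part))))
        [p0]

-- ===== PRECONDITION & SPEC =====
def Spec_generate_tag_variants (tag : String) (out : List String) : Prop := out = generate_tag_variants_alt tag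
instance (tag : String) (out : List String) : Decidable (Spec_generate_tag_variants tag out) := by unfold Spec_generate_tag_variants; infer_instance

-- ===== CLAIM (what is proved, stated in full; the proofs are below) =====
def Claim_equal_generate_tag_variants : Prop := ∀ (tag : String), Dom_generate_tag_variants tag → Spec_generate_tag_variants tag (generate_tag_variants tag)

-- ===== LEMMAS AND PROOFS =====

-- A's per-combo variant builder
def pvBuild (p0 : String) (rest : List String) (c : List String) : String :=
  (c.zip rest).foldl (fun v sp => v ++ sp.1 ++ sp.2) p0

theorem pv_add_mem {s : List String} {x : String} (h : x ∈ s) : PySem.Set.add s x = s := by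
  simp [PySem.Set.add, PySem.Set.contains, h]

theorem pv_add_not_mem {s : List String} {x : String} (h : x ∉ s) : PySem.Set.add s x = s ++ [x] := by
  simp [PySem.Set.add, PySem.Set.contains, h]

theorem pv_foldl_add_subset {s : List String} : ∀ {xs : List String}, (∀ a ∈ xs, a ∈ s) →
    List.foldl PySem.Set.add s xs = s := by
  intro xs
  induction xs with
  | nil => intro _; rfl
  | cons a t ih =>
      intro h
      simp only [List.foldl_cons, pv_add_mem (h a (by simp))]
      exact ih (fun b hb => h b (by simp [hb]))

theorem pv_ofList_append (u v : List String) :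
    PySem.Set.ofList (u ++ v) = List.foldl PySem.Set.add (PySem.Set.ofList u) v := by
  rw [PySem.Set.ofList_eq_foldl, PySem.Set.ofList_eq_foldl, List.foldl_append]

theorem pv_ofList_snoc (u : List String) (x : String) :
    PySem.Set.ofList (u ++ [x]) = PySem.Set.add (PySem.Set.ofList u) x := by
  rw [pv_ofList_append]; rfl

-- dedup commutes with flatMap: deduplicating the inputs first does not change the deduplicated outputs
theorem pv_ofList_flatMap (f : String → List String) (l : List String) :
    PySem.Set.ofList ((PySem.Set.ofList l).flatMap f) = PySem.Set.ofList (l.flatMap f) := by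
  induction l using List.reverseRecOn with
  | nil => rfl
  | append_singleton rs x ih =>
      by_cases hx : x ∈ rs
      · have h1 : PySem.Set.ofList (rs ++ [x]) = PySem.Set.ofList rs := by
          rw [pv_ofList_snoc, pv_add_mem ((PySem.Set.mem_ofList _ _).mpr hx)]
        rw [h1, ih, List.flatMap_append]
        simp only [List.flatMap_cons, List.flatMap_nil, List.append_nil]
        rw [pv_ofList_append]
        refine (pv_foldl_add_subset (fun a ha => ?_)).symm
        exact (PySem.Set.mem_ofList _ _).mpr (List.mem_flatMap.mpr ⟨x, hx, ha⟩)
      · rw [pv_ofList_snoc, pv_add_not_mem (fun h => hx ((PySem.Set.mem_ofList _ _).mp h)),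
          List.flatMap_append, List.flatMap_append]
        simp only [List.flatMap_cons, List.flatMap_nil, List.append_nil]
        rw [pv_ofList_append, pv_ofList_append, ih]

theorem pv_flatMap_congr {α β : Type} {l : List α} {f g : α → List β}
    (h : ∀ x ∈ l, f x = g x) : l.flatMap f = l.flatMap g := by
  induction l with
  | nil => rfl
  | cons a t ih =>
      simp only [List.flatMap_cons, h a (by simp)]
      rw [ih (fun x hx => h x (by simp [hx]))]

theorem pv_length_pyProdSeps : ∀ (n : Nat), ∀ c ∈ pyProdSeps n, c.length = n := by
  intro n
  induction n with
  | zero => simp [pyProdSeps]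
  | succ m ih =>
      intro c hc
      simp only [pyProdSeps, List.mem_flatMap, List.mem_map] at hc
      obtain ⟨d, hd, s, _, rfl⟩ := hc
      simp [ih d hd]

theorem pv_raw_snoc (p0 r : String) (rs : List String) :
    (pyProdSeps (rs.length + 1)).map (pvBuild p0 (rs ++ [r])) =
      ((pyProdSeps rs.length).map (pvBuild p0 rs)).flatMap
        (fun v => ["", "-", " "].map (fun sep => v ++ sep ++ r)) := by
  rw [List.flatMap_map]
  show (pyProdSeps rs.length |>.flatMap (fun c => ["", "-", " "].map (fun s => c ++ [s]))).map
      (pvBuild p0 (rs ++ [r])) = _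
  rw [List.map_flatMap]
  refine pv_flatMap_congr (fun c hc => ?_)
  have hlen : c.length = rs.length := pv_length_pyProdSeps _ c hc
  rw [List.map_map]
  refine List.map_congr_left (fun s _ => ?_)
  simp only [Function.comp]
  unfold pvBuild
  rw [List.zip_append hlen]
  simp

-- the heart: B's fold equals dedup of A's full enumeration
theorem pv_main : ∀ (rest : List String) (p0 : String),
    rest.foldl
        (fun cur part =>
          PySem.Set.ofList (cur.flatMap (fun v => ["", "-", " "].map (fun sep => v ++ sep ++ part))))
        [p0]
      = PySem.Set.ofList ((pyProdSeps rest.length).map (pvBuild p0 rest)) := by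
  intro rest
  induction rest using List.reverseRecOn with
  | nil => intro p0; rfl
  | append_singleton rs r ih =>
      intro p0
      rw [List.foldl_append, List.foldl_cons, List.foldl_nil, ih p0,
        pv_ofList_flatMap, ← pv_raw_snoc]
      simp

theorem pv_branch (p0 : String) (rest : List String) :
    ((pyProdSeps ((p0 :: rest).length - 1)).foldl
        (fun vs c =>
          PySem.Set.add vs
            ((c.zip (PySem.List.slice (p0 :: rest) (some 1) none)).foldl
              (fun v sp => v ++ sp.1 ++ sp.2) p0))
        PySem.Set.empty)
      = rest.foldl
          (fun cur part =>
            PySem.Set.ofList (cur.flatMap (fun v => ["", "-", " "].map (fun sep => v ++ sep ++ part))))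
          [p0] := by
  rw [pv_main rest p0]
  have hsl : PySem.List.slice (p0 :: rest) (some 1) none = rest := by
    rw [PySem.List.slice_from_one]; rfl
  rw [hsl]
  have hlen : (p0 :: rest).length - 1 = rest.length := by simp
  rw [hlen, PySem.Set.ofList_eq_foldl, List.foldl_map]
  rfl

theorem generate_tag_variants_eq (tag : String) :
    generate_tag_variants tag = generate_tag_variants_alt tag := by
  unfold generate_tag_variants generate_tag_variants_alt
  cases PySem.Str.split? tag " " with
  | none => rfl
  | some parts =>
      cases parts with
      | nil => rfl
      | cons p0 rest => exact pv_branch p0 rest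

-- ===== VERDICT (by name: the statement is the Claim_ definition above) =====
theorem generate_tag_variants_spec : Claim_equal_generate_tag_variants := by
  intro tag _
  unfold Spec_generate_tag_variants
  exact generate_tag_variants_eq tag
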